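-- pv_equiv track=rewrite | github.com/jwon112/3d-segmentation | models/channel_configs.py | parse_model_size
-- ===== SOURCE A (Python) =====
-- from typing import Dict, List, Tuple
--
-- def parse_model_size(model_name: str) -> Tuple[str, str]:
--     """
--     Parse model name to extract base name and size.
--
--     Args:
--         model_name: Model name (e.g., 'dualbranch_01_unet_s', 'unet3d_m')
--
--     Returns:
--         Tuple of (base_name, size) where size is 'xs', 's', 'm', or 'l'
--
--     Examples:
--         'dualbranch_01_unet_s' -> ('dualbranch_01_unet', 's')
--         'unet3d_m' -> ('unet3d', 'm')
--         'dualbranch_14_dilated_xs' -> ('dualbranch_14_dilated', 'xs')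
--     """
--     size_suffixes = ['_xs', '_s', '_m', '_l']
--
--     for suffix in size_suffixes:
--         if model_name.endswith(suffix):
--             base_name = model_name[:-len(suffix)]
--             size = suffix[1:]  # Remove leading underscore
--             return base_name, size
--
--     # Default to 's' if no size suffix found
--     return model_name, 's'
-- ===== SOURCE B (Python) =====
-- def parse_model_size(model_name):
--     base, sep, suffix = model_name.rpartition('_')
--     if sep and suffix in {'xs', 's', 'm', 'l'}:
--         return base, suffix
--     return model_name, 's'
-- ===== Notes on version B (the rewrite author's own statement) =====
-- stated objective: idiomatic
-- what changed: B splits the name once at its last underscore with rpartition and tests the resulting suffix against the set of valid sizes, instead of A's loop applying endswith to an ordered list of '_'-prefixed suffixes and slicing on the first hit.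
import Mathlib
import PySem

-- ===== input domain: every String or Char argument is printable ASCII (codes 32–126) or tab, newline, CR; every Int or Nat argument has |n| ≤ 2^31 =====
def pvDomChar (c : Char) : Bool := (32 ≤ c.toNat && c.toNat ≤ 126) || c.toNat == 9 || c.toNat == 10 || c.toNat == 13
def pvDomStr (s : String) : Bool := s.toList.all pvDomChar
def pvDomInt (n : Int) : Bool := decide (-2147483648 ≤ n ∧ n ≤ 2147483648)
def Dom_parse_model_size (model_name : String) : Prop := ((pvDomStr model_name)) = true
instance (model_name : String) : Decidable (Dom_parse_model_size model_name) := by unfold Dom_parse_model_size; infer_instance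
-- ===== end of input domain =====

-- B replaces A's ordered endswith loop by one rpartition at the last underscore plus a
-- set membership test on the suffix (objective: idiomatic single-pass parse).

-- ===== PORT A =====
-- the 'for suffix in size_suffixes' loop
def pmsLoop (model_name : String) : List String → String × String
  | [] => (model_name, "s")
  | suffix :: rest =>
    if PySem.Str.endswith model_name suffix then
      (PySem.Str.slice model_name none (some (-(PySem.Str.len suffix))),
       PySem.Str.slice suffix (some 1) none)
    else pmsLoop model_name rest

def parse_model_size (model_name : String) : String × String :=
  pmsLoop model_name ["_xs", "_s", "_m", "_l"]

-- ===== PORT B =====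
-- model_name.rpartition('_'), ported by hand for the one-character separator '_':
-- scan the reversed character list up to the first '_' (exact: rpartition splits at the
-- LAST occurrence of the separator, or returns ('', '', s) when it is absent).
def rpartitionUnderscore (s : String) : String × String × String :=
  let r := s.toList.reverse
  let suf := r.takeWhile (fun c => c ≠ '_')
  if suf.length = r.length then ("", "", s)
  else (String.ofList ((r.drop (suf.length + 1)).reverse), "_", String.ofList suf.reverse)

def parse_model_size_alt (model_name : String) : String × String :=
  let p := rpartitionUnderscore model_name
  if p.2.1 ≠ "" ∧ (p.2.2 = "xs" ∨ p.2.2 = "s" ∨ p.2.2 = "m" ∨ p.2.2 = "l") then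
    (p.1, p.2.2)
  else (model_name, "s")

-- ===== PRECONDITION & SPEC =====
def Spec_parse_model_size (model_name : String) (out : String × String) : Prop := out = parse_model_size_alt model_name
instance (model_name : String) (out : String × String) : Decidable (Spec_parse_model_size model_name out) := by unfold Spec_parse_model_size; infer_instance

-- ===== CLAIM (what is proved, stated in full; the proofs are below) =====
def Claim_equal_parse_model_size : Prop := ∀ (model_name : String), Dom_parse_model_size model_name → Spec_parse_model_size model_name (parse_model_size model_name)

-- ===== LEMMAS AND PROOFS =====

-- the first element dropWhile keeps falsifies the predicate
theorem dropWhile_cons_head {α : Type} (p : α → Bool) (r : List α) (a : α) (rest : List α)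
    (h : r.dropWhile p = a :: rest) : p a = false := by
  induction r with
  | nil => simp at h
  | cons x xs ih =>
    by_cases hx : p x
    · rw [List.dropWhile_cons_of_pos hx] at h; exact ih h
    · rw [List.dropWhile_cons_of_neg hx] at h; cases h; simpa using hx

-- if takeWhile did not consume everything, it is followed by an underscore
theorem tw_prefix (r : List Char) (h : r.takeWhile (fun c => c ≠ '_') ≠ r) :
    (r.takeWhile (fun c => c ≠ '_') ++ ['_']) <+: r := by
  have hsplit := List.takeWhile_append_dropWhile (p := fun c => decide (c ≠ '_')) (l := r)
  rcases hdc : r.dropWhile (fun c => decide (c ≠ '_')) with _ | ⟨a, rest⟩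
  · exact absurd (by conv_rhs => rw [← hsplit, hdc, List.append_nil]) h
  · have h2 := dropWhile_cons_head _ _ _ _ hdc
    simp at h2
    subst h2
    refine ⟨rest, ?_⟩
    rw [List.append_assoc]
    conv_rhs => rw [← hsplit, hdc]
    rfl

-- takeWhile over an underscore-free prefix followed by an underscore
theorem tw_of_prefix (r p : List Char) (h : (p ++ ['_']) <+: r) (hp : ∀ c ∈ p, c ≠ '_') :
    r.takeWhile (fun c => c ≠ '_') = p := by
  obtain ⟨rest, rfl⟩ := h
  rw [List.append_assoc, List.takeWhile_append]
  simp_all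

-- endswith, read on the reversed character list
theorem ends_xs (m : String) : PySem.Str.endswith m "_xs" = true ↔ ['s','x','_'] <+: m.toList.reverse := by
  rw [show (['s','x','_'] : List Char) = ("_xs".toList).reverse from rfl, List.reverse_prefix,
    PySem.Str.endswith_eq, PySem.Chars.endswith_iff]

theorem ends_s (m : String) : PySem.Str.endswith m "_s" = true ↔ ['s','_'] <+: m.toList.reverse := by
  rw [show (['s','_'] : List Char) = ("_s".toList).reverse from rfl, List.reverse_prefix,
    PySem.Str.endswith_eq, PySem.Chars.endswith_iff]

theorem ends_m (m : String) : PySem.Str.endswith m "_m" = true ↔ ['m','_'] <+: m.toList.reverse := by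
  rw [show (['m','_'] : List Char) = ("_m".toList).reverse from rfl, List.reverse_prefix,
    PySem.Str.endswith_eq, PySem.Chars.endswith_iff]

theorem ends_l (m : String) : PySem.Str.endswith m "_l" = true ↔ ['l','_'] <+: m.toList.reverse := by
  rw [show (['l','_'] : List Char) = ("_l".toList).reverse from rfl, List.reverse_prefix,
    PySem.Str.endswith_eq, PySem.Chars.endswith_iff]

theorem rev_drop_rev (l : List Char) (k : Nat) :
    (l.reverse.drop k).reverse = l.take (l.length - k) := by
  rw [List.reverse_drop]; simp

-- B's value when the reversed name starts with an underscore-free pattern p then '_'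
theorem alt_of_pattern (m : String) (p t : List Char)
    (hp : ∀ c ∈ p, c ≠ '_')
    (hmem : String.ofList p.reverse = "xs" ∨ String.ofList p.reverse = "s" ∨
            String.ofList p.reverse = "m" ∨ String.ofList p.reverse = "l")
    (ht : (p ++ ['_']) ++ t = m.toList.reverse) :
    parse_model_size_alt m =
      (String.ofList (m.toList.take (m.toList.length - (p.length + 1))), String.ofList p.reverse) := by
  have htw : m.toList.reverse.takeWhile (fun c => c ≠ '_') = p :=
    tw_of_prefix _ _ ⟨t, ht⟩ hp
  have hlen : m.toList.reverse.length = p.length + 1 + t.length := by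
    rw [← ht]; simp; omega
  have hr : rpartitionUnderscore m =
      (String.ofList ((m.toList.reverse.drop (p.length + 1)).reverse), "_", String.ofList p.reverse) := by
    simp only [rpartitionUnderscore, htw]
    rw [if_neg (by simp at hlen ⊢; omega)]
  simp only [parse_model_size_alt, hr]
  rw [if_pos ⟨by simp, by simpa using hmem⟩]
  rw [rev_drop_rev]

-- invert String.ofList on a reversed suffix
theorem ofList_rev_eq (suf : List Char) (q : String) (h : String.ofList suf.reverse = q) :
    suf = q.toList.reverse := by
  have h2 : suf.reverse = q.toList := by rw [← h]; simp
  rw [← h2, List.reverse_reverse]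

set_option maxHeartbeats 1000000 in
theorem parse_model_size_eq_alt (m : String) : parse_model_size m = parse_model_size_alt m := by
  by_cases h1 : ['s','x','_'] <+: m.toList.reverse
  · -- endswith '_xs'
    obtain ⟨t, ht⟩ := h1
    rw [alt_of_pattern m ['s','x'] t (by simp) (by decide) (by simpa using ht)]
    simp only [parse_model_size, pmsLoop]
    rw [if_pos ((ends_xs m).mpr ⟨t, ht⟩)]
    refine congrArg₂ Prod.mk ?_ (by decide)
    apply String.toList_inj.mp
    simp [pysem]
  · by_cases h2 : ['s','_'] <+: m.toList.reverse
    · -- endswith '_s'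
      obtain ⟨t, ht⟩ := h2
      rw [alt_of_pattern m ['s'] t (by simp) (by decide) (by simpa using ht)]
      simp only [parse_model_size, pmsLoop]
      rw [if_neg (mt (ends_xs m).mp h1), if_pos ((ends_s m).mpr ⟨t, ht⟩)]
      refine congrArg₂ Prod.mk ?_ (by decide)
      apply String.toList_inj.mp
      simp [pysem]
    · by_cases h3 : ['m','_'] <+: m.toList.reverse
      · -- endswith '_m'
        obtain ⟨t, ht⟩ := h3
        rw [alt_of_pattern m ['m'] t (by simp) (by decide) (by simpa using ht)]
        simp only [parse_model_size, pmsLoop]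
        rw [if_neg (mt (ends_xs m).mp h1), if_neg (mt (ends_s m).mp h2),
          if_pos ((ends_m m).mpr ⟨t, ht⟩)]
        refine congrArg₂ Prod.mk ?_ (by decide)
        apply String.toList_inj.mp
        simp [pysem]
      · by_cases h4 : ['l','_'] <+: m.toList.reverse
        · -- endswith '_l'
          obtain ⟨t, ht⟩ := h4
          rw [alt_of_pattern m ['l'] t (by simp) (by decide) (by simpa using ht)]
          simp only [parse_model_size, pmsLoop]
          rw [if_neg (mt (ends_xs m).mp h1), if_neg (mt (ends_s m).mp h2),
            if_neg (mt (ends_m m).mp h3), if_pos ((ends_l m).mpr ⟨t, ht⟩)]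
          refine congrArg₂ Prod.mk ?_ (by decide)
          apply String.toList_inj.mp
          simp [pysem]
        · -- no size suffix: both default to (model_name, 's')
          simp only [parse_model_size, pmsLoop]
          rw [if_neg (mt (ends_xs m).mp h1), if_neg (mt (ends_s m).mp h2),
            if_neg (mt (ends_m m).mp h3), if_neg (mt (ends_l m).mp h4)]
          by_cases hEq : m.toList.reverse.takeWhile (fun c => c ≠ '_') = m.toList.reverse
          · have hr : rpartitionUnderscore m = ("", "", m) := by
              simp only [rpartitionUnderscore]
              rw [if_pos (by rw [hEq])]
            simp only [parse_model_size_alt, hr]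
            rw [if_neg (by simp)]
          · have hpre := tw_prefix _ hEq
            have hr : rpartitionUnderscore m =
                (String.ofList ((m.toList.reverse.drop
                    ((m.toList.reverse.takeWhile (fun c => c ≠ '_')).length + 1)).reverse), "_",
                 String.ofList (m.toList.reverse.takeWhile (fun c => c ≠ '_')).reverse) := by
              simp only [rpartitionUnderscore]
              rw [if_neg (fun hlen => hEq ((List.takeWhile_prefix _).eq_of_length hlen))]
            simp only [parse_model_size_alt, hr]
            rw [if_neg ?_]
            rintro ⟨-, hq | hq | hq | hq⟩ <;>
              [exact h1 (by rw [ofList_rev_eq _ "xs" hq] at hpre; simpa using hpre);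
               exact h2 (by rw [ofList_rev_eq _ "s" hq] at hpre; simpa using hpre);
               exact h3 (by rw [ofList_rev_eq _ "m" hq] at hpre; simpa using hpre);
               exact h4 (by rw [ofList_rev_eq _ "l" hq] at hpre; simpa using hpre)]

-- ===== VERDICT (by name: the statement is the Claim_ definition above) =====
theorem parse_model_size_spec : Claim_equal_parse_model_size := by
  intro m _
  unfold Spec_parse_model_size
  exact parse_model_size_eq_alt m
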